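-- pv_equiv track=rewrite | github.com/LegalHackersNatalBrasil/tjsp | jus.py | jus_gen
-- ===== SOURCE A (Python) =====
-- def jus_gen(j, tr, o, n_max, ano=2018):
--     # Ano - Ano do ajuizamento do Processo
--     # J - Órgão ou Segmento do Poder Judiciário
--     # TR - Tribunal do respectivo Segmento do Poder Judiciário
--     # O - Unidade de origem do Processo
--     return_list = []
--     for n in range(0, n_max + 1):
--         numero = int(f'{n:07}{ano:04}{j:01}{tr:02}{o:04}')
--         dd = 98 - (numero * 100 % 97)
--         return_list.append(
--             f'{n:07}-{dd:02}.{ano:04}.{j:01}.{tr:02}.{o:04}'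
--         )
--     return return_list
-- ===== SOURCE B (Python) =====
-- def jus_gen(j, tr, o, n_max, ano=2018):
--     # Precompute the fixed fields and their modular contribution once; each
--     # check digit is then derived arithmetically from n alone
--     # (dd = 98 - (n % 97 * base + c) % 97), with no per-n digit-string
--     # construction or big-integer conversion.
--     f_ano, f_j, f_tr, f_o = f'{ano:04}', f'{j:01}', f'{tr:02}', f'{o:04}'
--     suffix = f_ano + f_j + f_tr + f_o
--     s = 0
--     for ch in suffix:
--         s = s * 10 + (ord(ch) - 48)
--     base = 10 ** (len(suffix) + 2) % 97
--     c = s * 100 % 97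
--     out = []
--     for n in range(n_max + 1):
--         dd = 98 - (n % 97 * base + c) % 97
--         out.append(f'{n:07}-{dd:02}.{f_ano}.{f_j}.{f_tr}.{f_o}')
--     return out
-- ===== Notes on version B (the rewrite author's own statement) =====
-- stated objective: faster
-- what changed: The fixed fields and their contribution mod 97 are precomputed once and each check digit is derived arithmetically from n alone (dd = 98 - (n % 97 * base + c) % 97), eliminating the per-n digit-string construction and big-integer conversion.
import Mathlib
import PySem

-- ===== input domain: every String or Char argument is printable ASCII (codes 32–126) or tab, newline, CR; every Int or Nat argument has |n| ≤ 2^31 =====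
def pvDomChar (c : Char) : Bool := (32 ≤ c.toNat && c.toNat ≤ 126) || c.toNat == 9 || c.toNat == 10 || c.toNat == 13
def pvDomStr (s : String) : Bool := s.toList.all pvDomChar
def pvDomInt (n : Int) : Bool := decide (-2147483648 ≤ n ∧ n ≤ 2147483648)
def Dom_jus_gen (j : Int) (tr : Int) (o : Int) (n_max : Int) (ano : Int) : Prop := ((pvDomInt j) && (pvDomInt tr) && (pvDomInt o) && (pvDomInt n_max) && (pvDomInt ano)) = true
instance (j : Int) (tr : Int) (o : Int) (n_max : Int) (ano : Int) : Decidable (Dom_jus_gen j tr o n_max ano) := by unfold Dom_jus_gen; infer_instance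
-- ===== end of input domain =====

-- B precomputes the fixed fields and their contribution mod 97 once and derives each
-- check digit arithmetically from n (dd = 98 - (n % 97 * base + c) % 97), instead of
-- rebuilding the digit string and converting it to a big integer for every n
-- (objective: faster, constant-factor, measured).

-- ===== PORT A =====
-- f'{v:07}' etc.: PySem has no int format-spec primitive, so the zero-padded field is
-- ported by hand as str(v).zfill(w) built from PySem.Int.toChars and PySem.Chars.zfill;
-- this is exact: Python's format(v, '0Nd') equals str(v).zfill(N) for every int v.
def jusFmt (v : Int) (w : Int) : List Char := PySem.Chars.zfill (PySem.Int.toChars v) w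

-- int(s): ported by hand, step for step, as the decimal digit fold; exact on the
-- nonempty all-digit strings this code feeds it under Pre_ (PySem.Int.ofStr? agrees
-- there but its recursion is module-private and cannot be unfolded in proofs).
-- The inputs on which Python's int() raises ValueError are excluded by Pre_.
def jusDigits (cs : List Char) : Int := cs.foldl (fun a c => a * 10 + ((c.toNat : Int) - 48)) 0

def jus_gen (j : Int) (tr : Int) (o : Int) (n_max : Int) (ano : Int) : List String :=
  (PySem.List.pyRange 0 (n_max + 1) 1).foldl
    (fun return_list n =>
      let numero := jusDigits (jusFmt n 7 ++ jusFmt ano 4 ++ jusFmt j 1 ++ jusFmt tr 2 ++ jusFmt o 4)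
      let dd : Int := 98 - PySem.Int.mod (numero * 100) 97
      return_list ++ [String.ofList (jusFmt n 7 ++ '-' :: (jusFmt dd 2 ++ '.' :: (jusFmt ano 4 ++ '.' :: (jusFmt j 1 ++ '.' :: (jusFmt tr 2 ++ '.' :: jusFmt o 4)))))])
    []

-- ===== PORT B =====
-- ord(ch) - 48 is ported as (ch.toNat : Int) - 48; the fixed fields are formatted once.
def jus_gen_alt (j : Int) (tr : Int) (o : Int) (n_max : Int) (ano : Int) : List String :=
  let fAno := jusFmt ano 4
  let fJ := jusFmt j 1
  let fTr := jusFmt tr 2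
  let fO := jusFmt o 4
  let suffix := fAno ++ fJ ++ fTr ++ fO
  let s := suffix.foldl (fun a ch => a * 10 + ((ch.toNat : Int) - 48)) 0
  let base := PySem.Int.mod ((10 : Int) ^ (suffix.length + 2)) 97
  let c := PySem.Int.mod (s * 100) 97
  (PySem.List.pyRange 0 (n_max + 1) 1).foldl
    (fun out n =>
      let dd : Int := 98 - PySem.Int.mod (PySem.Int.mod n 97 * base + c) 97
      out ++ [String.ofList (jusFmt n 7 ++ '-' :: (jusFmt dd 2 ++ '.' :: (fAno ++ '.' :: (fJ ++ '.' :: (fTr ++ '.' :: fO)))))])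
    []

-- ===== PRECONDITION & SPEC =====
-- Pre_ excludes exactly the inputs on which Python A raises ValueError: when the loop
-- body runs (0 ≤ n_max) and some field is negative, its '-' sign lands inside the
-- concatenated digit string and int() fails.
def Pre_jus_gen (j : Int) (tr : Int) (o : Int) (n_max : Int) (ano : Int) : Prop :=
  0 ≤ n_max → (0 ≤ j ∧ 0 ≤ tr ∧ 0 ≤ o ∧ 0 ≤ ano)
instance (j : Int) (tr : Int) (o : Int) (n_max : Int) (ano : Int) : Decidable (Pre_jus_gen j tr o n_max ano) := by unfold Pre_jus_gen; infer_instance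
def pvWitness_jus_gen : Int × Int × Int × Int × Int := (1, 2, 3, 4, 2018)

def Spec_jus_gen (j : Int) (tr : Int) (o : Int) (n_max : Int) (ano : Int) (out : List String) : Prop := out = jus_gen_alt j tr o n_max ano
instance (j : Int) (tr : Int) (o : Int) (n_max : Int) (ano : Int) (out : List String) : Decidable (Spec_jus_gen j tr o n_max ano out) := by unfold Spec_jus_gen; infer_instance

-- ===== CLAIM (what is proved, stated in full; the proofs are below) =====
def Claim_equal_jus_gen : Prop := ∀ (j : Int) (tr : Int) (o : Int) (n_max : Int) (ano : Int), Dom_jus_gen j tr o n_max ano → Pre_jus_gen j tr o n_max ano → Spec_jus_gen j tr o n_max ano (jus_gen j tr o n_max ano)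

-- ===== LEMMAS AND PROOFS =====

-- splitting the digit fold across an append
lemma jusDigits_foldl_acc (l : List Char) (a : Int) :
    l.foldl (fun r c => r * 10 + ((c.toNat : Int) - 48)) a
      = a * 10 ^ l.length + jusDigits l := by
  induction l generalizing a with
  | nil => simp [jusDigits]
  | cons c l ih =>
      have h1 := ih (a * 10 + ((c.toNat : Int) - 48))
      have h2 := ih (0 * 10 + ((c.toNat : Int) - 48))
      simp only [jusDigits, List.foldl_cons, List.length_cons] at *
      rw [h1, h2]; ring

lemma jusDigits_append (a b : List Char) :
    jusDigits (a ++ b) = jusDigits a * 10 ^ b.length + jusDigits b := by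
  unfold jusDigits
  rw [List.foldl_append]
  exact jusDigits_foldl_acc b _

lemma jusDigits_digitChar (k : Nat) (h : k < 10) :
    ((Nat.digitChar k).toNat : Int) - 48 = (k : Int) := by
  interval_cases k <;> decide

-- value of the decimal representation
lemma jusDigits_toDigits (m : Nat) : jusDigits (Nat.toDigits 10 m) = (m : Int) := by
  induction m using Nat.strong_induction_on with
  | _ m ih =>
    rw [Nat.toDigits_eq_if (by norm_num)]
    by_cases h : m < 10
    · rw [if_pos h]
      show 0 * 10 + ((Nat.digitChar m).toNat - 48 : Int) = (m : Int)
      rw [jusDigits_digitChar m h]; ring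
    · rw [if_neg h, jusDigits_append]
      rw [ih (m / 10) (by omega)]
      have hd : jusDigits [Nat.digitChar (m % 10)] = ((m % 10 : Nat) : Int) := by
        show 0 * 10 + ((Nat.digitChar (m % 10)).toNat - 48 : Int) = _
        rw [jusDigits_digitChar (m % 10) (Nat.mod_lt _ (by norm_num))]; ring
      rw [hd]
      simp only [List.length_singleton, pow_one]
      have := Nat.div_add_mod m 10
      push_cast
      omega

lemma jusDigits_replicate_zero (k : Nat) : jusDigits (List.replicate k '0') = 0 := by
  induction k with
  | zero => rfl
  | succ k ih =>
      show (List.replicate k '0').foldl (fun a c => a * 10 + ((c.toNat : Int) - 48))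
        (0 * 10 + (('0'.toNat : Int) - 48)) = 0
      have h0 : (0 : Int) * 10 + (('0'.toNat : Int) - 48) = 0 := by decide
      rw [h0]
      exact ih

-- zero left-padding does not change the digit value
lemma jusDigits_zfill (cs : List Char) (w : Int)
    (h : ∀ c ∈ cs, c.isDigit = true) :
    jusDigits (PySem.Chars.zfill cs w) = jusDigits cs := by
  unfold PySem.Chars.zfill
  by_cases h1 : w ≤ (cs.length : Int)
  · rw [if_pos h1]
  · rw [if_neg h1]
    cases cs with
    | nil => rw [jusDigits_replicate_zero]; rfl
    | cons c rest =>
        show jusDigits (if c = '+' ∨ c = '-'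
            then c :: (List.replicate (w.toNat - (c :: rest).length) '0' ++ rest)
            else List.replicate (w.toNat - (c :: rest).length) '0' ++ c :: rest)
          = jusDigits (c :: rest)
        rw [if_neg]
        · rw [jusDigits_append, jusDigits_replicate_zero]; ring
        · have hc := h c (List.mem_cons_self)
          rintro (rfl | rfl) <;> simp at hc

lemma jusDigits_jusFmt (n w : Int) (hn : 0 ≤ n) : jusDigits (jusFmt n w) = n := by
  unfold jusFmt PySem.Int.toChars
  rw [if_neg (by omega)]
  rw [jusDigits_zfill _ _ (fun c hc => Nat.isDigit_of_mem_toDigits (by norm_num) (by norm_num) hc)]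
  rw [jusDigits_toDigits, Int.toNat_of_nonneg hn]

-- the check digit of n*10^L + s, taken mod 97 fieldwise (B) or in one piece (A)
lemma jus_mod_key (n s : Int) (L : Nat) :
    PySem.Int.mod ((n * 10 ^ L + s) * 100) 97
      = PySem.Int.mod (PySem.Int.mod n 97 * PySem.Int.mod ((10 : Int) ^ (L + 2)) 97
          + PySem.Int.mod (s * 100) 97) 97 := by
  simp only [PySem.Int.mod_eq_emod_of_pos (show (0:Int) < 97 by norm_num)]
  have h1 : (n * 10 ^ L + s) * 100 = n * 10 ^ (L + 2) + s * 100 := by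
    rw [pow_add]; ring
  rw [h1]
  conv_rhs => rw [Int.add_emod, Int.emod_emod_of_dvd _ (dvd_refl 97), ← Int.mul_emod,
    ← Int.add_emod]

-- ===== VERDICT (by name: the statement is the Claim_ definition above) =====
theorem jus_gen_spec : Claim_equal_jus_gen := by
  intro j tr o n_max ano _ hpre
  unfold Spec_jus_gen jus_gen jus_gen_alt
  apply PySem.List.foldl_congr_mem
  intro acc n hmem
  rw [PySem.List.mem_pyRange_one] at hmem
  obtain ⟨hj, htr, ho, hano⟩ := hpre (by omega)
  dsimp only
  have hassoc : jusFmt n 7 ++ jusFmt ano 4 ++ jusFmt j 1 ++ jusFmt tr 2 ++ jusFmt o 4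
      = jusFmt n 7 ++ (jusFmt ano 4 ++ jusFmt j 1 ++ jusFmt tr 2 ++ jusFmt o 4) := by
    simp [List.append_assoc]
  rw [hassoc, jusDigits_append, jusDigits_jusFmt n 7 hmem.1]
  have hs : (jusFmt ano 4 ++ jusFmt j 1 ++ jusFmt tr 2 ++ jusFmt o 4).foldl
      (fun a ch => a * 10 + ((ch.toNat : Int) - 48)) 0
      = jusDigits (jusFmt ano 4 ++ jusFmt j 1 ++ jusFmt tr 2 ++ jusFmt o 4) := rfl
  rw [hs, jus_mod_key]
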